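/- GENERATED by tools/from_farm_form.py from prooffarm-gif/accepted/GifAddExtensionBlock.2/Lemmas.lean (a worked proof of the farm's unit `GifAddExtensionBlock.2`,
   accepted by the verdict) — do not edit. -/
import Gif.Spec.Units.GifAddExtensionBlock_2
import Gif.Spec.AllSegs

/-!
  Lemmas for the unit `GifAddExtensionBlock.2` (segment 2 of `GifAddExtensionBlock`, 107BA6H … 107C05H and 107C48H; gifalloc.c l.247-255):
  the re-load of `*blocks`, `(*count)++`, the three fields of the new block, `Bytes = malloc(Len)`.
  THE MODEL OF A `malloc` CLIENT whose allocation may fail and that stores a count and an element AROUND the call: both outcomes of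
  `malloc` end in the same exit assertion, with another heap and another forest. Between `(*count)++` and the store of `ep->Bytes`
  the block is COUNTED with a garbage `Bytes` field: no `Shape` holds there. The segment carries the `GifOK` of its ENTRY and the
  footprint since (`gab2_Mid.same`), and applies `GifOK.pend_snoc` ONCE, at the exit.

  THE WALK, one lemma per returned callee state (the split on the GHOST `Fc.pend` is made BEFORE the walk, in Proof.lean):
      gab2_null               107BA6H → 107C4DH    `*blocks == NULL` (the first `malloc` failed): GIF_ERROR, nothing changed
      gab2_Mid                the assertion at 107BF5H (ret9), the return of `malloc(Len)`
      gab2_to_malloc          107BA6H → 107BF5H    the count, the two scalar fields, `call malloc`: `gab2_Mid`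
      gab2_from_malloc        107BF5H → 107C05H    the checked store of `ep->Bytes`: the block is counted (`GifOK.pend_snoc`)
  From the tree (Gif/Spec/AllocCarry.lean): `GifOK.gif_where`, `.pend_where`, `.pend_live`, `.pend_far_gif`, `HeapOK.next_where` (the
  preludes), `read_through_alloc` (a field read through `malloc`'s footprint), `GifOK.pend_snoc`, `Forest.mem_datas_snoc` (the
  exit), `GifAddExtensionBlock.AfterArray.frame_carry` (the function's slots, footprint, `rem`); `word_times24` (Words.lean),
  `succ32` (Words2.lean).
-/

open X86 X86.User Asan ProgX.Base ProgX.Base.Spec Gif.Spec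

set_option maxRecDepth 4000
set_option maxHeartbeats 4000000

namespace Gif.Spec.GifAddExtensionBlock_2

/-! ### The walk -/

/-- **107BA6H … 107BB4H, 107C48H → 107C4DH** (l.247-248 `if (*ExtensionBlocks == NULL) return GIF_ERROR`): the forest has no pending
list (the first `malloc` of segment 1 failed), so the checked load of `*blocks` gives NULL (`GifOK.pend_null_iff`), `eax = 0`.
Nothing but the return address of the check routine was written: `Done` for the heap and the forest of the cut. -/
theorem gab2_null (Lay : Layout) (hLay : Lay.hi = 0x1000000) (μ : Microarch) (hμ : UserX.MicroOK μ) (u₀ : State)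
    (hcode : HasCodeNat Lay u₀ Gif.L.GifAddExtensionBlock.entry Gif.Code.code_GifAddExtensionBlock.nat
      Gif.L.GifAddExtensionBlock.size)
    (h_load8 : Asan.SmallCheck Lay μ ProgX.Base.WayInv (ProgX.Base.CodeOK u₀) [.rax, .rcx, .rdx] 8
      ProgX.Base.L.__asan_load8_noabort.entry)
    (H : Heap) (rest : List Obj) (frames : List (Nat × FrameLayout)) (F : Forest) (R : Rd) (len : Nat) (Hc : Heap) (Fc : Forest)
    (e : State) (ret : Word) (v : State)
    (hat : GifAddExtensionBlock.AfterArray H rest frames F R len Hc Fc u₀ e ret v) (hnone : Fc.pend = none) :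
    ReachVia Lay μ ProgX.Base.WayInv v (GifAddExtensionBlock.Done H rest frames F R len Hc Fc u₀ e ret) := by
  -- 1. the entry state's facts
  have he := hat.entry
  v_entry he
  have henv : Env H rest frames F R e := hat.pre.1
  have hrsi : (e.reg .rsi).toNat = F.gif + 88 := hat.pre.2.2.1
  have hok := hat.inv.heap
  have hbase : Hc.base = 0x800000 := hat.region.1.trans henv.heap.base
  have hgifc : Fc.gif = F.gif := hat.sameBut.1
  have hcur := henv.ctx.cursor_range henv.heap.inv.shadow
  -- where gif is (one inequality per hypothesis: the walker's side conditions)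
  obtain ⟨hg1, hg2, hg3⟩ := hat.ok.gif_where hok hbase
  rw [hgifc] at hg1 hg2 hg3
  have hglive : Hc.Live F.gif 120 := by
    rw [← hgifc]
    exact hat.ok.gif_live
  -- 2. the present state
  have w_rip := hat.rip
  have c_rsp : v.reg .rsp = e.reg .rsp - 56 := hat.rsp
  have c_rbx : v.reg .rbx = e.reg .rsi := hat.rbx
  have w_eq : Mem.EqOn ProgX.Base.L.textLo ProgX.Base.L.textHi u₀.mem v.mem := ProgX.Base.conv_code_eqOn hat.code
  have hdf : v.flags .df = false := (show abiInv _ from hat.abi).1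
  have hmx : v.mxcsr &&& 0x1F80 = 0x1F80 := (show abiInv _ from hat.abi).2
  have hsse := ProgX.Base.sseOK_of_abiInv hat.abi
  have w_kept : RegsKept [.rsp] v v := RegsKept.refl _ _
  -- 3. the load of `*blocks`, as a fact for the walker: NULL (the forest has no pending list)
  have hnull := (hat.ok.pend_null_iff hok).mpr hnone
  simp only [gfield] at hnull
  have l_blocks : v.mem.readLE (e.reg .rsi) 8 = 0 := by
    rw [rd_eq_readLE v.mem (e.reg .rsi) (Fc.gif + 88) 8 (by omega)]
    exact hnull
  -- 4. the walk: the arm `*blocks != NULL` is pruned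
  u_walk hcode [hμ.vendor] until [Gif.L.GifAddExtensionBlock.at_107c4d]
    span [ProgX.Base.L.textLo, ProgX.Base.L.textHi] side (v_side)
  case check_107ba9 =>
    -- l.247 `*ExtensionBlocks`: inside gif
    have hun : ShadowUntouched v.mem s_107ba9.mem := by v_untouched
    have hl : LiveIn (Hc.liveObjs ++ rest) frames F.gif 120 := hglive.liveIn rest frames (Nat.le_refl _) (Nat.le_refl _)
    exact hl.accSmall hat.inv.shadow hun _ 8 (by decide) (by u_omega) (by u_omega)
  -- 5. 107C4DH: `Done` (`v_inv` FIRST: it is slow in a bigger context); only the check's return address was written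
  have habi : (conv u₀).inv s_107c48 := by v_inv
  have hun : ShadowUntouched v.mem s_107c48.mem := by v_untouched
  have hsame : Mem.SameExcept [⟨(e.reg .rsp).toNat - 64, (e.reg .rsp).toNat - 56⟩] v.mem s_107c48.mem := by
    rw [w_mem]
    u_same
  -- the function's frame: the seven slots, the contract's footprint, `rem`
  have hframe := hat.frame_carry he_room he_top hcur hsame (by
    intro w hw
    have e1 : w = ⟨(e.reg .rsp).toNat - 64, (e.reg .rsp).toNat - 56⟩ := List.mem_singleton.mp hw
    subst e1
    left
    simp only
    omega)
  obtain ⟨k15, k14, k13, k12, kbp, kbx, kra, ksame, krem⟩ := hframe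
  refine ReachVia.done ⟨hat.entry, hat.pre, w_rip, w_rsp, ?_, k15, k14, k13, k12, kbp, kbx, kra, hat.region, hat.sameBut, ?_, ?_,
    krem, ksame, ProgX.Base.conv_code_in w_eq, ?_⟩
  · -- GIF_ERROR
    right
    rw [w_rax]
    decide
  · -- the heap's invariant: a store to the stack
    apply hat.inv.sameExcept hun hsame
    intro w hw
    have e1 : w = ⟨(e.reg .rsp).toNat - 64, (e.reg .rsp).toNat - 56⟩ := List.mem_singleton.mp hw
    subst e1
    left
    left
    rw [hbase]
    simp only
    omega
  · -- the state invariant: the stack below the cursor is loose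
    apply hat.ok.sameExcept hok ⟨hcur.1, hcur.2.1⟩ hsame
    intro w hw
    have e1 : w = ⟨(e.reg .rsp).toNat - 64, (e.reg .rsp).toNat - 56⟩ := List.mem_singleton.mp hw
    subst e1
    exact Loose.stack hok (by simp only; omega) (by simp only; omega) (by simp only; omega)
  · exact habi

/-- **AT 107BF5H (ret9), `malloc(Len)` HAS RETURNED** (l.255), inside the segment entered at the state `v` of the cut 107BA6H with the
pending list `x`. `ep = x.arr + 24 · length` is the slot behind the counted blocks: `rbx = ep`; `*count` is the new count,
`ep->ByteCount = Len` and `ep->Function` are stored, `ep->Bytes` is NOT yet (the window in which the block is counted with a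
garbage `Bytes` field: no `Shape` is stated, the shape of the cut `v` and the footprint since are carried instead).
`rax` is the result of `malloc`: the present heap `Hm` is the cut's heap or that with the new object; BOTH outcomes are one
clause: `Hm` owns what the forest of the cut owns and the object of the block `⟨rax, Len⟩` (none if `rax = 0`). -/
structure gab2_Mid (H : Heap) (rest : List Obj) (frames : List (Nat × FrameLayout)) (F : Forest) (R : Rd) (len : Nat)
    (Hc : Heap) (Fc : Forest) (x : Exts) (Hm : Heap) (u₀ e : State) (ret : Word) (v w : State) : Prop where
  /-- the assertion of the cut 107BA6H, at the state `v` the segment started from -/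
  start : GifAddExtensionBlock.AfterArray H rest frames F R len Hc Fc u₀ e ret v
  /-- the pending list of the cut -/
  pend : Fc.pend = some x
  rip : w.rip = Gif.L.GifAddExtensionBlock.ret9
  rsp : w.reg .rsp = e.reg .rsp - 56
  /-- `rbx = ep`, the slot behind the counted blocks -/
  rbx : (w.reg .rbx).toNat = x.arr + 24 * x.blocks.length
  /-- `r12d = Len` -/
  r12 : (w.reg .r12).toNat = len
  /-- `r13 = ExtData` -/
  r13 : w.reg .r13 = e.reg .r8
  /-- `(*count)++` is done -/
  count : rd w.mem (F.gif + 80) 4 = x.blocks.length + 1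
  /-- `ep->ByteCount = Len` is stored -/
  byteCount : rd w.mem (x.arr + 24 * x.blocks.length) 4 = len
  /-- the present heap is at the place of the cut's -/
  region : SameRegion Hc Hm
  /-- the heap's invariant, the clean stack ending at the body's stack pointer -/
  inv : HeapInv Hm rest frames ((e.reg .rsp).toNat - 56) w.mem
  /-- BOTH OUTCOMES OF `malloc`: what the forest of the cut owns, and the object of the new block (none if `rax = 0`) -/
  owns : Owns Hm (Blk.objs ⟨(w.reg .rax).toNat, len⟩ ++ Fc.owned)
  /-- what was written since the cut: the function's stack below the body's stack pointer, `*count`, two fields of the slot `ep`,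
  `malloc`'s footprint (the control cell, the next chunk's header, the shadow of the next object) -/
  same : Mem.SameExcept
    [⟨(e.reg .rsp).toNat - 208, (e.reg .rsp).toNat - 56⟩,
     ⟨F.gif + 80, F.gif + 84⟩,
     ⟨x.arr + 24 * x.blocks.length, x.arr + 24 * x.blocks.length + 4⟩,
     ⟨x.arr + 24 * x.blocks.length + 16, x.arr + 24 * x.blocks.length + 20⟩,
     ⟨0x800000, 0x800008⟩,
     ⟨Hc.next - 32, Hc.next - 8⟩,
     ⟨0xC00000 + Hc.next / 8, 0xC00000 + (Hc.next + len + 7) / 8⟩] v.mem w.mem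
  code : Mem.EqOn ProgX.Base.L.textLo ProgX.Base.L.textHi u₀.mem w.mem
  abi : (conv u₀).inv w

/-- **107BA6H … 107BF0H, `call malloc`, 107BF5H (ret9)** (l.247-255): the pending list is `x` (`*blocks = x.arr ≠ 0`), `*count` its length
`n` (an `int`: the array of `24 · cap ≥ 24 · (n + 1)` bytes lies inside the heap's region), `ep = x.arr + 24 n` lies inside the
array's object (`room`): the two checked stores `ep->Function`, `ep->ByteCount`; `malloc`'s precondition: the heap's invariant
through the stores so far (stack; inside gif; inside the array's object: `HeapInv.sameExcept`). Both outcomes of `AllocPost`. -/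
theorem gab2_to_malloc (Lay : Layout) (hLay : Lay.hi = 0x1000000) (μ : Microarch) (hμ : UserX.MicroOK μ) (u₀ : State)
    (hcode : HasCodeNat Lay u₀ Gif.L.GifAddExtensionBlock.entry Gif.Code.code_GifAddExtensionBlock.nat
      Gif.L.GifAddExtensionBlock.size)
    (h_malloc : ∀ (H : Heap) (rest : List Obj) (frames : List (Nat × FrameLayout)),
      Calls Lay μ ProgX.Base.WayInv (ProgX.Base.conv u₀) ProgX.Base.L.malloc.entry (ProgX.Base.Spec.malloc.spec H rest frames))
    (h_load8 : Asan.SmallCheck Lay μ ProgX.Base.WayInv (ProgX.Base.CodeOK u₀) [.rax, .rcx, .rdx] 8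
      ProgX.Base.L.__asan_load8_noabort.entry)
    (h_load4 : Asan.SmallCheck Lay μ ProgX.Base.WayInv (ProgX.Base.CodeOK u₀) [.rax, .rcx, .rdx] 4
      ProgX.Base.L.__asan_load4_noabort.entry)
    (h_store4 : Asan.SmallCheck Lay μ ProgX.Base.WayInv (ProgX.Base.CodeOK u₀) [.rax, .rcx, .rdx] 4
      ProgX.Base.L.__asan_store4_noabort.entry)
    (H : Heap) (rest : List Obj) (frames : List (Nat × FrameLayout)) (F : Forest) (R : Rd) (len : Nat) (Hc : Heap) (Fc : Forest)
    (e : State) (ret : Word) (v : State)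
    (hat : GifAddExtensionBlock.AfterArray H rest frames F R len Hc Fc u₀ e ret v) (x : Exts) (hsome : Fc.pend = some x) :
    ReachVia Lay μ ProgX.Base.WayInv v (fun w => ∃ Hm, gab2_Mid H rest frames F R len Hc Fc x Hm u₀ e ret v w) := by
  -- 1. the entry state's facts
  have he := hat.entry
  v_entry he
  have henv : Env H rest frames F R e := hat.pre.1
  have hrdi : (e.reg .rdi).toNat = F.gif + 80 := hat.pre.2.1
  have hrsi : (e.reg .rsi).toNat = F.gif + 88 := hat.pre.2.2.1
  have hlen1 : 1 ≤ len := hat.pre.2.2.2.2.1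
  have hlen2 : len ≤ 255 := hat.pre.2.2.2.2.2.1
  have hok := hat.inv.heap
  have hbase : Hc.base = 0x800000 := hat.region.1.trans henv.heap.base
  have hlimit : Hc.limit = 0xC00000 := hat.region.2.trans henv.heap.limit
  have hgifc : Fc.gif = F.gif := hat.sameBut.1
  have hcur := henv.ctx.cursor_range henv.heap.inv.shadow
  -- where gif, the pending array and the next chunk are (one inequality per hypothesis: the walker's side conditions)
  obtain ⟨hg1, hg2, hg3⟩ := hat.ok.gif_where hok hbase
  rw [hgifc] at hg1 hg2 hg3
  have hglive : Hc.Live F.gif 120 := by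
    rw [← hgifc]
    exact hat.ok.gif_live
  have halive : Hc.Live x.arr (24 * x.cap) := hat.ok.pend_live hsome
  obtain ⟨ha1, ha2, ha3⟩ := hat.ok.pend_where hok hbase hsome
  obtain ⟨hnx1, hnx2⟩ := hok.next_where hbase hlimit
  -- the pending list: the pointer, the count, the room behind the counted blocks
  have hroomx := hat.room x hsome
  have hshape := hat.ok.shape.pend
  rw [hsome] at hshape
  obtain ⟨hp1, hp2, -, -⟩ := hshape
  simp only [gfield] at hp1 hp2
  -- the count `n` and the array `a` as variables
  obtain ⟨n, hn⟩ : ∃ n, x.blocks.length = n := ⟨_, rfl⟩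
  obtain ⟨a, ha⟩ : ∃ a, x.arr = a := ⟨_, rfl⟩
  rw [hn] at hp2 hroomx
  rw [ha] at hp1 ha1 ha2 ha3 halive
  have hn31 : n < 2 ^ 31 := by omega
  -- the slot `ep = a + 24 n` as a word: A VARIABLE (the kernel is slow on `(UInt64.ofNat (a + 24 * n)).toNat`)
  obtain ⟨ep, hepw, hep⟩ : ∃ ep : Word,
      UInt64.ofNat a + (UInt64.ofNat n + UInt64.ofNat n * 2) * 8 = ep ∧ ep.toNat = a + 24 * n :=
    ⟨_, word_times24 a n hn31 (by omega), toNat_ofNat_addr _ (by omega)⟩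
  have hep16 : (ep + 16).toNat = a + 24 * n + 16 := by
    have e16 : (16 : UInt64).toNat = 16 := rfl
    rw [UInt64.toNat_add, hep, e16]
    omega
  -- 2. the present state
  have hm := h_malloc Hc rest frames
  have w_rip := hat.rip
  have c_rsp : v.reg .rsp = e.reg .rsp - 56 := hat.rsp
  have c_rbx : v.reg .rbx = e.reg .rsi := hat.rbx
  have c_rbp : v.reg .rbp = e.reg .rdi := hat.rbp
  have c_r12 : v.reg .r12 = UInt64.ofNat len := by
    apply UInt64.toNat_inj.mp
    rw [hat.r12, toNat_ofNat_addr len (by omega)]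
  have w_eq : Mem.EqOn ProgX.Base.L.textLo ProgX.Base.L.textHi u₀.mem v.mem := ProgX.Base.conv_code_eqOn hat.code
  have hdf : v.flags .df = false := (show abiInv _ from hat.abi).1
  have hmx : v.mxcsr &&& 0x1F80 = 0x1F80 := (show abiInv _ from hat.abi).2
  have hsse := ProgX.Base.sseOK_of_abiInv hat.abi
  have w_kept : RegsKept [.rsp] v v := RegsKept.refl _ _
  -- 3. the two loads: `*blocks = a`, `*count = n`
  have l_blocks : v.mem.readLE (e.reg .rsi) 8 = a := by
    rw [rd_eq_readLE v.mem (e.reg .rsi) (Fc.gif + 88) 8 (by omega)]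
    exact hp1
  have l_count : v.mem.readLE (e.reg .rdi) 4 = n := by
    rw [rd_eq_readLE v.mem (e.reg .rdi) (Fc.gif + 80) 4 (by omega)]
    exact hp2
  -- 4. the walk, to the return of `malloc`
  u_walk hcode [hμ.vendor, cnt32_ofBV n (by omega), cnt32_sext n hn31, cnt32_sext len (by omega), hepw]
    until [Gif.L.GifAddExtensionBlock.at_107c4d, Gif.L.GifAddExtensionBlock.ret9]
    span [ProgX.Base.L.textLo, ProgX.Base.L.textHi] side (v_side)
  case check_107ba9 =>
    -- l.247 `*ExtensionBlocks`: inside gif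
    have hun : ShadowUntouched v.mem s_107ba9.mem := by v_untouched
    have hl : LiveIn (Hc.liveObjs ++ rest) frames F.gif 120 := hglive.liveIn rest frames (Nat.le_refl _) (Nat.le_refl _)
    exact hl.accSmall hat.inv.shadow hun _ 8 (by decide) (by u_omega) (by u_omega)
  case check_107bbd =>
    -- l.251 `(*ExtensionBlockCount)++`: inside gif
    have hun : ShadowUntouched v.mem s_107bbd.mem := by v_untouched
    have hl : LiveIn (Hc.liveObjs ++ rest) frames F.gif 120 := hglive.liveIn rest frames (Nat.le_refl _) (Nat.le_refl _)
    exact hl.accSmall hat.inv.shadow hun _ 4 (by decide) (by u_omega) (by u_omega)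
  case check_107bd9 =>
    -- l.253 `ep->Function = Function`: the slot behind the counted blocks lies inside the array (`room`)
    have hun : ShadowUntouched v.mem s_107bd9.mem := by v_untouched
    have hl : LiveIn (Hc.liveObjs ++ rest) frames a (24 * x.cap) := halive.liveIn rest frames (Nat.le_refl _) (Nat.le_refl _)
    exact hl.accSmall hat.inv.shadow hun _ 4 (by decide) (by u_omega) (by u_omega)
  case check_107be5 =>
    -- l.254 `ep->ByteCount = Len`
    have hun : ShadowUntouched v.mem s_107be5.mem := by v_untouched
    have hl : LiveIn (Hc.liveObjs ++ rest) frames a (24 * x.cap) := halive.liveIn rest frames (Nat.le_refl _) (Nat.le_refl _)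
    exact hl.accSmall hat.inv.shadow hun _ 4 (by decide) (by u_omega) (by u_omega)
  case call_inv =>
    v_inv
  case pre_107bf0 =>
    -- malloc's precondition: the heap's invariant through the stores so far, at the callee's `rsp + 8` = the body's stack pointer
    have hun : ShadowUntouched v.mem s_107bf0.mem := by v_untouched
    have hs : Mem.SameExcept
        [⟨(e.reg .rsp).toNat - 64, (e.reg .rsp).toNat - 56⟩,
         ⟨F.gif + 80, F.gif + 84⟩,
         ⟨a + 24 * n, a + 24 * n + 4⟩,
         ⟨a + 24 * n + 16, a + 24 * n + 20⟩] v.mem s_107bf0.mem := by u_same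
    have e_rsp : (s_107bf0.reg .rsp).toNat + 8 = (e.reg .rsp).toNat - 56 := by
      rw [w_rsp]
      u_omega
    refine ⟨?_, hbase, hlimit, henv.heap.text, henv.heap.offText⟩
    rw [e_rsp]
    apply hat.inv.sameExcept hun hs
    intro w hw
    simp only [List.mem_cons, List.not_mem_nil, or_false] at hw
    rcases hw with hw | hw | hw | hw
    · -- the stack lies below the heap's region
      subst hw
      left
      left
      rw [hbase]
      simp only
      omega
    · -- `*count`: inside gif
      subst hw
      exact HeapWin.live hok hglive (by simp only; omega) (by simp only; omega)
    · -- `ep->ByteCount`: inside the array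
      subst hw
      exact HeapWin.live hok halive (by simp only; omega) (by simp only; omega)
    · -- `ep->Function`
      subst hw
      exact HeapWin.live hok halive (by simp only; omega) (by simp only; omega)
  -- 5. 107BF5H (ret9): `malloc` has returned: the post with its type ascribed, the argument a number; the invariant
  have elen : (UInt64.ofNat len).toNat = len := toNat_ofNat_addr len (by omega)
  have hpost : AllocPost Hc rest frames 32 (s_107bf0.reg .rdi).toNat (r16 (s_107bf0.reg .rdi).toNat) s_107bf0 s_107bf0r :=
    w_post
  rw [w_rdi_107bf0, elen] at hpost
  clear w_post
  have habi : (conv u₀).inv s_107bf0r := w_inv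
  have e8 : (s_107bf0.reg .rsp).toNat + 8 = (e.reg .rsp).toNat - 56 := by
    rw [w_rsp_107bf0]
    u_omega
  -- the two values stored, as numbers
  rw [succ32 n (by omega), cnt32_part_toNat len (by omega)] at w_mem_107bf0
  -- the count and `ep->ByteCount` before the call (gif and the array are apart: a DISJUNCTION, built inside the one `have`
  -- that needs it: in the context of `u_frame` / `u_read` it costs a minute of kernel time)
  have hc0 : s_107bf0.mem.readLE (e.reg .rdi) 4 = n + 1 := by
    have hfar := hat.ok.pend_far_gif hok hsome
    rw [ha, hgifc] at hfar
    rw [w_mem_107bf0]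
    u_read
  have hb0 : s_107bf0.mem.readLE ep 4 = len := by
    rw [w_mem_107bf0]
    u_read
  v_after_call w_rsp_107bf0 w_mem_107bf0
  simp only [shadowSpan, w_rdi_107bf0, elen] at w_same
  -- … and through `malloc`'s footprint: a slot-like read by `u_frame`, a field of a heap object by the PURE lemma
  rw [w_mem_107bf0] at hc0 hb0
  have hc1 : s_107bf0r.mem.readLE (e.reg .rdi) 4 = n + 1 := by u_frame hc0
  have hb1 : s_107bf0r.mem.readLE ep 4 = len :=
    read_through_alloc w_same ep 4 len (by u_omega) (by omega) (by omega) (by omega) hb0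
  -- 6. what was written since the cut: carried INSTEAD of a shape (the block is counted, its `Bytes` is garbage)
  have hsameV : Mem.SameExcept
      [⟨(e.reg .rsp).toNat - 208, (e.reg .rsp).toNat - 56⟩,
       ⟨F.gif + 80, F.gif + 84⟩,
       ⟨a + 24 * n, a + 24 * n + 4⟩,
       ⟨a + 24 * n + 16, a + 24 * n + 20⟩,
       ⟨0x800000, 0x800008⟩,
       ⟨Hc.next - 32, Hc.next - 8⟩,
       ⟨0xC00000 + Hc.next / 8, 0xC00000 + (Hc.next + len + 7) / 8⟩] v.mem s_107bf0r.mem := by u_same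
  -- the fields of `gab2_Mid` that do not depend on the outcome
  have k_r12 : (s_107bf0r.reg .r12).toNat = len := by
    rw [w_kept.get .r12 rfl]
    exact hat.r12
  have k_r13 : s_107bf0r.reg .r13 = e.reg .r8 := (w_kept.get .r13 rfl).trans hat.r13
  have k_count : rd s_107bf0r.mem (F.gif + 80) 4 = n + 1 := by
    rw [← rd_eq_readLE s_107bf0r.mem (e.reg .rdi) (F.gif + 80) 4 hrdi]
    exact hc1
  have k_bytes : rd s_107bf0r.mem (a + 24 * n) 4 = len := by
    rw [← rd_eq_readLE s_107bf0r.mem ep (a + 24 * n) 4 hep]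
    exact hb1
  have k_rbx : (s_107bf0r.reg .rbx).toNat = a + 24 * n := by
    rw [w_rbx]
    exact hep
  subst hn
  subst ha
  -- 7. BOTH OUTCOMES, last: ONE `Owns` clause (`Blk.objs ⟨rax, len⟩` is empty for `rax = 0`)
  by_cases hfit : Hc.Fits (r16 len)
  · -- ROOM: `rax = Hc.next`, the new object is live and nobody's yet
    obtain ⟨k1, k2⟩ := hpost.1 hfit
    rw [e8] at k2
    have hne : Hc.next ≠ 0 := by omega
    refine ReachVia.done ⟨Hc.push len (r16 len), hat, hsome, w_rip, w_rsp, k_rbx, k_r12, k_r13, k_count, k_bytes,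
      SameRegion.push Hc len (r16 len), k2, ?_, hsameV, w_eq, habi⟩
    rw [k1]
    unfold Blk.objs
    simp only [hne, if_false, List.singleton_append]
    exact hat.ok.owns.push_cons hok len (r16 len)
  · -- NO ROOM: `rax = 0`, the heap of the cut, nothing but stack written
    obtain ⟨k1, k2, -, -⟩ := hpost.2 hfit
    rw [e8] at k2
    refine ReachVia.done ⟨Hc, hat, hsome, w_rip, w_rsp, k_rbx, k_r12, k_r13, k_count, k_bytes, SameRegion.refl Hc, k2, ?_, hsameV,
      w_eq, habi⟩
    rw [k1]
    unfold Blk.objs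
    simp only [UInt64.toNat_zero, if_true, List.nil_append]
    exact hat.ok.owns

/-- **107BF5H (ret9) … 107C05H** (l.255 `ep->Bytes = malloc(Len)`): `rbp = rax`, the checked store of `ep->Bytes` (inside the array's object,
live in the present heap whatever `malloc` did). Now the slot `ep` holds the block `⟨rax, Len⟩` and `*count` counts it: the state
invariant for the present heap and the forest with the block counted (`GifOK.pend_snoc`: `ExtsAt.snoc`, `Shape.set_pend` ONCE, from the
shape of the cut 107BA6H and the footprint since). `rbp` is NULL or the new data object. -/
theorem gab2_from_malloc (Lay : Layout) (hLay : Lay.hi = 0x1000000) (μ : Microarch) (hμ : UserX.MicroOK μ) (u₀ : State)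
    (hcode : HasCodeNat Lay u₀ Gif.L.GifAddExtensionBlock.entry Gif.Code.code_GifAddExtensionBlock.nat
      Gif.L.GifAddExtensionBlock.size)
    (h_store8 : Asan.SmallCheck Lay μ ProgX.Base.WayInv (ProgX.Base.CodeOK u₀) [.rax, .rcx, .rdx] 8
      ProgX.Base.L.__asan_store8_noabort.entry)
    (H : Heap) (rest : List Obj) (frames : List (Nat × FrameLayout)) (F : Forest) (R : Rd) (len : Nat) (Hc : Heap) (Fc : Forest)
    (x : Exts) (Hm : Heap) (e : State) (ret : Word) (v w : State)
    (hmid : gab2_Mid H rest frames F R len Hc Fc x Hm u₀ e ret v w) :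
    ReachVia Lay μ ProgX.Base.WayInv w (fun z =>
      ∃ Hc' Fc', GifAddExtensionBlock.AfterBytes H rest frames F R len Hc' Fc' u₀ e ret z) := by
  -- 1. the entry state's facts, the cut's
  have hat := hmid.start
  have hsome := hmid.pend
  have he := hat.entry
  v_entry he
  have henv : Env H rest frames F R e := hat.pre.1
  have hlen1 : 1 ≤ len := hat.pre.2.2.2.2.1
  have hlen2 : len ≤ 255 := hat.pre.2.2.2.2.2.1
  have hok := hat.inv.heap
  have hbase : Hc.base = 0x800000 := hat.region.1.trans henv.heap.base
  have hlimit : Hc.limit = 0xC00000 := hat.region.2.trans henv.heap.limit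
  have hbasem : Hm.base = 0x800000 := hmid.region.1.trans hbase
  have hgifc : Fc.gif = F.gif := hat.sameBut.1
  have hcur := henv.ctx.cursor_range henv.heap.inv.shadow
  -- the pending array: live in the PRESENT heap (whatever `malloc` did: `gab2_Mid.owns`)
  have harr_owned : (x.arr, 24 * x.cap) ∈ Fc.owned := Forest.mem_owned_pend (by rw [hsome]; exact List.mem_cons_self)
  have halive : Hm.Live x.arr (24 * x.cap) := hmid.owns.live _ (List.mem_append_right _ harr_owned)
  have hroomx := hat.room x hsome
  -- where gif, the pending array and the next chunk of the cut's heap are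
  obtain ⟨ha1, ha2, ha3⟩ := hat.ok.pend_where hok hbase hsome
  obtain ⟨hg1, hg2, hg3⟩ := hat.ok.gif_where hok hbase
  rw [hgifc] at hg1 hg2 hg3
  obtain ⟨hnx1, hnx2⟩ := hok.next_where hbase hlimit
  -- 2. the present state; `rbx = ep`, `rax` as variables
  obtain ⟨ep, c_rbx⟩ : ∃ ep, w.reg .rbx = ep := ⟨_, rfl⟩
  have hep : ep.toNat = x.arr + 24 * x.blocks.length := by
    rw [← c_rbx]
    exact hmid.rbx
  have hep8 : (ep + 8).toNat = x.arr + 24 * x.blocks.length + 8 := by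
    have e8 : (8 : UInt64).toNat = 8 := rfl
    rw [UInt64.toNat_add, hep, e8]
    omega
  obtain ⟨b, c_rax⟩ : ∃ b, w.reg .rax = b := ⟨_, rfl⟩
  have howns := hmid.owns
  rw [c_rax] at howns
  have w_rip := hmid.rip
  have c_rsp : w.reg .rsp = e.reg .rsp - 56 := hmid.rsp
  have w_eq : Mem.EqOn ProgX.Base.L.textLo ProgX.Base.L.textHi u₀.mem w.mem := hmid.code
  have hdf : w.flags .df = false := (show abiInv _ from hmid.abi).1
  have hmx : w.mxcsr &&& 0x1F80 = 0x1F80 := (show abiInv _ from hmid.abi).2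
  have hsse := ProgX.Base.sseOK_of_abiInv hmid.abi
  have w_kept : RegsKept [.rsp] w w := RegsKept.refl _ _
  -- the footprint since the cut 107BA6H (what `u_same` goes through)
  have hsame := hmid.same
  -- 3. the walk
  u_walk hcode [hμ.vendor] until [Gif.L.GifAddExtensionBlock.at_107c05]
    span [ProgX.Base.L.textLo, ProgX.Base.L.textHi] side (v_side)
  case check_107bfc =>
    -- l.255 `ep->Bytes = …`: inside the array, which is live in the present heap
    have hun : ShadowUntouched w.mem s_107bfc.mem := by v_untouched
    have hl : LiveIn (Hm.liveObjs ++ rest) frames x.arr (24 * x.cap) := halive.liveIn rest frames (Nat.le_refl _) (Nat.le_refl _)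
    exact hl.accSmall hmid.inv.shadow hun _ 8 (by decide) (by u_omega) (by u_omega)
  -- 4. 107C05H: `AfterBytes` (`v_inv` FIRST)
  have habi : (conv u₀).inv s_107c01 := by v_inv
  -- what was written since ret9: the return address of the check, `ep->Bytes`
  have hun : ShadowUntouched w.mem s_107c01.mem := by v_untouched
  have hsameW : Mem.SameExcept
      [⟨(e.reg .rsp).toNat - 64, (e.reg .rsp).toNat - 56⟩,
       ⟨x.arr + 24 * x.blocks.length + 8, x.arr + 24 * x.blocks.length + 16⟩] w.mem s_107c01.mem := by
    clear hsame
    rw [w_mem]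
    u_same
  -- … and since the cut 107BA6H: the three fields of the slot `ep` as one window
  have hsameV : Mem.SameExcept
      [⟨(e.reg .rsp).toNat - 208, (e.reg .rsp).toNat - 56⟩,
       ⟨Fc.gif + 80, Fc.gif + 84⟩,
       ⟨x.arr + 24 * x.blocks.length, x.arr + 24 * x.blocks.length + 24⟩,
       ⟨0x800000, 0x800008⟩,
       ⟨Hc.next - 32, Hc.next - 8⟩,
       ⟨0xC00000 + Hc.next / 8, 0xC00000 + (Hc.next + len + 7) / 8⟩] v.mem s_107c01.mem := by
    rw [hgifc, w_mem]
    u_same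
  -- 5. the count and the two fields of the block, in the present memory (gif and the array are apart: the disjunction lives
  --    inside the one `have` that needs it)
  have k_count : rd s_107c01.mem (Fc.gif + 80) 4 = x.blocks.length + 1 := by
    have hfar := hat.ok.pend_far_gif hok hsome
    rw [hgifc] at hfar
    rw [hgifc, hsameW.rd (F.gif + 80) 4 (by omega) ?_]
    · exact hmid.count
    · intro y hy
      simp only [List.mem_cons, List.not_mem_nil, or_false] at hy
      rcases hy with hy | hy
      · subst hy
        simp only
        omega
      · subst hy
        simp only
        omega
  have k_bc : rd s_107c01.mem (x.arr + 24 * x.blocks.length) 4 = len := by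
    rw [hsameW.rd (x.arr + 24 * x.blocks.length) 4 (by omega) ?_]
    · exact hmid.byteCount
    · intro y hy
      simp only [List.mem_cons, List.not_mem_nil, or_false] at hy
      rcases hy with hy | hy
      · subst hy
        simp only
        omega
      · subst hy
        simp only
        omega
  have k_by : rd s_107c01.mem (x.arr + 24 * x.blocks.length + 8) 8 = b.toNat := by
    have hb64 := b.toNat_lt
    rw [w_mem, rd_writeLE_same _ (ep + 8) 8 b.toNat _ hep8 (by omega)]
    exact Nat.mod_eq_of_lt (by omega)
  -- 6. the state invariant with the block counted: ONE step from the cut's `GifOK` and the footprint since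
  have hok' := GifOK.pend_snoc hat.ok hok hbase ⟨hcur.1, hcur.2.1⟩ hsome hroomx hlen1 hlen2 howns hsameV (by omega) (by omega)
    k_count k_bc k_by
  -- the heap's invariant: a store to the stack, a store into the array
  have hinv' : HeapInv Hm rest frames ((e.reg .rsp).toNat - 56) s_107c01.mem := by
    apply hmid.inv.sameExcept hun hsameW
    intro y hy
    simp only [List.mem_cons, List.not_mem_nil, or_false] at hy
    rcases hy with hy | hy
    · subst hy
      left
      left
      rw [hbasem]
      simp only
      omega
    · subst hy
      exact HeapWin.live hmid.inv.heap halive (by simp only; omega) (by simp only; omega)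
  -- the function's frame: the seven slots, the contract's footprint, `rem`
  have hframe := hat.frame_carry he_room he_top hcur hsameV (by
    intro y hy
    simp only [List.mem_cons, List.not_mem_nil, or_false] at hy
    rcases hy with hy | hy | hy | hy | hy | hy
    · subst hy
      left
      simp only
      omega
    · subst hy
      right
      simp only
      omega
    · subst hy
      right
      simp only
      omega
    · subst hy
      right
      simp only
      omega
    · subst hy
      right
      simp only
      omega
    · subst hy
      right
      simp only
      omega)
  obtain ⟨k15, k14, k13, k12, kbp, kbx, kra, ksame, krem⟩ := hframe
  refine ReachVia.done ⟨Hm, _, hat.entry, hat.pre, w_rip, w_rsp, ?_, ?_, ?_, k15, k14, k13, k12, kbp, kbx, kra,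
    hat.region.trans hmid.region, ?_, hinv', hok', krem, ksame, ProgX.Base.conv_code_in w_eq, habi⟩
  · -- `rbp`: NULL, or the new data object
    rw [w_rbp]
    by_cases hb0 : b.toNat = 0
    · left
      exact hb0
    · right
      exact Forest.mem_datas_snoc Fc x b.toNat len hb0
  · rw [w_kept.get .r12 rfl]
    exact hmid.r12
  · exact (w_kept.get .r13 rfl).trans hmid.r13
  · exact ⟨hat.sameBut.1, hat.sameBut.2.1, hat.sameBut.2.2.1, hat.sameBut.2.2.2.1, hat.sameBut.2.2.2.2⟩

end Gif.Spec.GifAddExtensionBlock_2
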